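-- pv_equiv track=rewrite | github.com/BoBaUla/ML_Python | ShareProject/ShareAnalysis/Evaluation/EvaluateStrategy.py | initLimitStrategies
-- ===== SOURCE A (Python) =====
-- class StrategyMapper:
--
--     maxRange = 1
--
--     def __init__(self, maxStrategyRange):
--         self.maxStrategyRange = maxStrategyRange
--
--
--     def mapStategyToNumber(self, strat):
--         return strat[0]* self.maxStrategyRange + strat[1]
--
--     def mapNumberToStrategy(self, strat):
--         sellAt = strat % self.maxStrategyRange
--         stopLoss = int((strat - sellAt) / self.maxStrategyRange)
--         return [stopLoss, sellAt]
--
-- def initLimitStrategies(maxStrategyRange):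
--     strategies = []
--     mapper = StrategyMapper(maxStrategyRange)
--     for sellAtFactor in range(maxStrategyRange):
--         for stopLossFactor in range(maxStrategyRange):
--             if sellAtFactor > 0 and stopLossFactor > 0:
--                 strategies.append( mapper.mapStategyToNumber([sellAtFactor, stopLossFactor]))
--     return strategies
-- ===== SOURCE B (Python) =====
-- def initLimitStrategies(maxStrategyRange):
--     if maxStrategyRange < 1:
--         return []
--     return [k for k in range(maxStrategyRange, maxStrategyRange * maxStrategyRange)
--             if k % maxStrategyRange != 0]
-- ===== Notes on version B (the rewrite author's own statement) =====
-- stated objective: simpler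
-- what changed: Replaces the nested sellAt/stopLoss loops and the StrategyMapper class with a single filtered pass over the encoded numbers k in range(n, n*n), keeping those k not divisible by n (nonzero stopLoss); rows with zero sellAt never appear since the range starts at n.
import Mathlib
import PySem

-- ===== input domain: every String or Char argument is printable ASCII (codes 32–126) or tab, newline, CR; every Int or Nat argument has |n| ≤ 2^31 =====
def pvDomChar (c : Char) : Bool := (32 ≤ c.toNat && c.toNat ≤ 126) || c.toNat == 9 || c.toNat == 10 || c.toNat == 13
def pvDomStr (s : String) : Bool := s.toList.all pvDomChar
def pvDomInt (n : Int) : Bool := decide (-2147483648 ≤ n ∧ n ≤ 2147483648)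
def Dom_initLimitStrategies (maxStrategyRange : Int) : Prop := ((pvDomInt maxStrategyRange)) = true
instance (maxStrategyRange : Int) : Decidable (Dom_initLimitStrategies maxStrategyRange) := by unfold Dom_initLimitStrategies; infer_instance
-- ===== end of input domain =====

-- B replaces the nested loops + StrategyMapper with one filtered pass over the encoded range (simpler decomposition).
-- ===== PORT A =====
-- mapper.mapStategyToNumber([s, t]) = s * maxStrategyRange + t, inlined at the single call site
def initLimitStrategies (maxStrategyRange : Int) : List Int :=
  (PySem.List.pyRange 0 maxStrategyRange 1).foldl (fun strategies sellAtFactor =>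
    (PySem.List.pyRange 0 maxStrategyRange 1).foldl (fun strategies stopLossFactor =>
      if sellAtFactor > 0 ∧ stopLossFactor > 0 then
        strategies ++ [sellAtFactor * maxStrategyRange + stopLossFactor]
      else strategies) strategies) []

-- ===== PORT B =====
def initLimitStrategies_alt (maxStrategyRange : Int) : List Int :=
  if maxStrategyRange < 1 then []
  else (PySem.List.pyRange maxStrategyRange (maxStrategyRange * maxStrategyRange) 1).filter
    (fun k => PySem.Int.mod k maxStrategyRange != 0)

-- ===== PRECONDITION & SPEC =====
def Spec_initLimitStrategies (maxStrategyRange : Int) (out : List Int) : Prop := out = initLimitStrategies_alt maxStrategyRange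
instance (maxStrategyRange : Int) (out : List Int) : Decidable (Spec_initLimitStrategies maxStrategyRange out) := by unfold Spec_initLimitStrategies; infer_instance

-- ===== CLAIM (what is proved, stated in full; the proofs are below) =====
def Claim_equal_initLimitStrategies : Prop := ∀ (maxStrategyRange : Int), Dom_initLimitStrategies maxStrategyRange → Spec_initLimitStrategies maxStrategyRange (initLimitStrategies maxStrategyRange)

-- ===== LEMMAS AND PROOFS =====

-- the filtered block [s*n, s*n+n) equals the row of encodings s*n+t for t in [1, n)
lemma block_eq (n s : Int) (hn : 1 ≤ n) :
    (PySem.List.pyRange (s * n) (s * n + n) 1).filter (fun k => PySem.Int.mod k n != 0)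
      = (PySem.List.pyRange 1 n 1).map (fun t => s * n + t) := by
  rw [PySem.List.pyRange_one_cons (by omega : s * n < s * n + n)]
  have hmod0 : PySem.Int.mod (s * n) n = 0 := by
    rw [PySem.Int.mod_eq_emod_of_pos (by omega)]
    simp [Int.mul_emod_left]
  have hkeep : ∀ k ∈ PySem.List.pyRange (s * n + 1) (s * n + n) 1,
      (PySem.Int.mod k n != 0) = true := by
    intro k hk
    rw [PySem.List.mem_pyRange_one] at hk
    rw [PySem.Int.mod_eq_emod_of_pos (by omega : (0:ℤ) < n)]
    have hk2 : k = (k - s * n) + n * s := by ring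
    rw [hk2, Int.add_mul_emod_self_left, Int.emod_eq_of_lt (by omega) (by omega)]
    simp; omega
  rw [List.filter_cons_of_neg (by simp [hmod0]), List.filter_eq_self.mpr hkeep]
  rw [PySem.List.pyRange_one, PySem.List.pyRange_one]
  have h1 : (s * n + n - (s * n + 1)).toNat = (n - 1).toNat := by omega
  rw [h1, List.map_map]
  exact List.map_congr_left (fun k _ => by simp [Function.comp]; ring)

-- the filtered range [n, n + j*n) is the concatenation of the rows s = 1 .. j
lemma rows_eq (n : Int) (hn : 1 ≤ n) (j : Nat) :
    (PySem.List.pyRange n (n + j * n) 1).filter (fun k => PySem.Int.mod k n != 0)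
      = (PySem.List.pyRange 1 (1 + j) 1).flatMap
          (fun s => (PySem.List.pyRange 1 n 1).map (fun t => s * n + t)) := by
  induction j with
  | zero => simp [PySem.List.pyRange_one_eq_nil]
  | succ j ih =>
    have hcast : ((j + 1 : Nat) : Int) = (j : Int) + 1 := by push_cast; ring
    rw [hcast]
    rw [PySem.List.pyRange_one_append n (n + j * n) (n + ((j:Int) + 1) * n)
      (by nlinarith [Int.natCast_nonneg j] : n ≤ n + (j:Int) * n)
      (by nlinarith : n + (j:Int) * n ≤ n + ((j:Int) + 1) * n)]
    rw [List.filter_append, ih]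
    have hb : (PySem.List.pyRange (n + (j:Int) * n) (n + ((j:Int) + 1) * n) 1).filter
        (fun k => PySem.Int.mod k n != 0)
        = (PySem.List.pyRange 1 n 1).map (fun t => (1 + (j:Int)) * n + t) := by
      have h1 : n + (j:Int) * n = (1 + (j:Int)) * n := by ring
      have h2 : n + ((j:Int) + 1) * n = (1 + (j:Int)) * n + n := by ring
      rw [h1, h2, block_eq n (1 + (j:Int)) hn]
    rw [hb]
    have h3 : (1 : Int) + ((j:Int) + 1) = (1 + (j:Int)) + 1 := by ring
    rw [h3, PySem.List.pyRange_one_succ_right (by omega : (1:Int) ≤ 1 + (j:Int))]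
    simp

-- ===== VERDICT (by name: the statement is the Claim_ definition above) =====
theorem initLimitStrategies_spec : Claim_equal_initLimitStrategies := by
  intro n _
  unfold Spec_initLimitStrategies initLimitStrategies initLimitStrategies_alt
  by_cases hn : n < 1
  · rw [if_pos hn, PySem.List.pyRange_one_eq_nil (by omega)]
    simp
  · rw [if_neg hn]
    have hn' : 1 ≤ n := by omega
    -- A side: flatten the nested appending loops into filter / map / flatMap
    simp only [PySem.List.foldl_append_ite, PySem.List.foldl_append_eq_flatMap, List.nil_append]
    have hA : (PySem.List.pyRange 0 n 1).flatMap
        (fun s => ((PySem.List.pyRange 0 n 1).filter (fun t => decide (s > 0 ∧ t > 0))).map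
          (fun t => s * n + t))
        = (PySem.List.pyRange 1 n 1).flatMap
          (fun s => (PySem.List.pyRange 1 n 1).map (fun t => s * n + t)) := by
      rw [PySem.List.pyRange_one_cons (by omega : (0:ℤ) < n), List.flatMap_cons]
      have hz : (0:ℤ) + 1 = 1 := by norm_num
      rw [hz]
      have h0 : List.filter (fun t => decide ((0:ℤ) > 0 ∧ t > 0))
          (0 :: PySem.List.pyRange 1 n 1) = [] := by simp
      rw [h0]
      simp only [List.map_nil, List.nil_append]
      apply List.flatMap_congr
      intro s hs
      rw [PySem.List.mem_pyRange_one] at hs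
      congr 1
      rw [List.filter_cons_of_neg (by simp)]
      apply List.filter_eq_self.mpr
      intro t ht
      rw [PySem.List.mem_pyRange_one] at ht
      simp; omega
    rw [hA]
    -- B side via rows_eq with j = (n-1).toNat
    have hj : ((n - 1).toNat : Int) = n - 1 := by omega
    have h1 : n * n = n + ((n - 1).toNat : Int) * n := by rw [hj]; ring
    have h2 : (1 : Int) + ((n - 1).toNat : Int) = n := by omega
    rw [h1, rows_eq n hn' (n - 1).toNat, h2]
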